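-- pv_equiv track=rewrite | github.com/daniel-reich/turbo-robot | hGzNSr5CSEpTsmy5W_4.py | not_good_math
-- ===== SOURCE A (Python) =====
-- def not_good_math(n,k):
--   while k > 0:
--       if n%10==0:
--           n //= 10
--       else:
--           n -= 1
--       k -= 1
--   return n
-- ===== SOURCE B (Python) =====
-- def not_good_math(n, k):
--     # batch the subtract-1 steps down to the next multiple of 10, short-circuit n == 0
--     while k > 0 and n != 0:
--         r = n % 10
--         if r == 0:
--             n //= 10
--             k -= 1
--         else:
--             t = r if r < k else k
--             n -= t
--             k -= t
--     return n
-- ===== Notes on version B (the rewrite author's own statement) =====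
-- stated objective: faster
-- what changed: Instead of k single steps, B jumps in one arithmetic move over all consecutive subtract-1 steps (t = min(n%10, k)) and stops early when n reaches 0, where A would keep dividing 0 by 10.
import Mathlib
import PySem

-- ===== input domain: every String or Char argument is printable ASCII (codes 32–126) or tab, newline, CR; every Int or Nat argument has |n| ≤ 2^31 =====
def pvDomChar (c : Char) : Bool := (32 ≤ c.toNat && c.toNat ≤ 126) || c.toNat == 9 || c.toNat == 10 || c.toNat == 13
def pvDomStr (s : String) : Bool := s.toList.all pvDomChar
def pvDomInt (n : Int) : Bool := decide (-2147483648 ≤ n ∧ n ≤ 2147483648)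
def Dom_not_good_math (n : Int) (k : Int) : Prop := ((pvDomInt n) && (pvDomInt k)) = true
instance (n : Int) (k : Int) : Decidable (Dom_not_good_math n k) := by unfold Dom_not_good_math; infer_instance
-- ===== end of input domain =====

-- B replaces A's k single steps by one arithmetic jump per digit (batching the subtract-1
-- steps to the next multiple of 10) and short-circuits once n reaches 0 (objective: faster).


-- ===== PORT A =====
def not_good_math (n : Int) (k : Int) : Int :=
  if _h : k > 0 then
    if PySem.Int.mod n 10 == 0 then
      not_good_math (PySem.Int.floordiv n 10) (k - 1)
    else
      not_good_math (n - 1) (k - 1)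
  else n
termination_by k.toNat
decreasing_by all_goals omega

-- ===== PORT B =====
def not_good_math_alt (n : Int) (k : Int) : Int :=
  if h : k > 0 ∧ n ≠ 0 then
    let r := PySem.Int.mod n 10
    if r == 0 then
      not_good_math_alt (PySem.Int.floordiv n 10) (k - 1)
    else
      let t := if r < k then r else k
      not_good_math_alt (n - t) (k - t)
  else n
termination_by k.toNat
decreasing_by
  · omega
  · have hm : PySem.Int.mod n 10 = n % 10 := PySem.Int.mod_eq_emod_of_pos (by norm_num)
    simp only [beq_iff_eq] at *
    split <;> omega

-- ===== PRECONDITION & SPEC =====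
def Spec_not_good_math (n : Int) (k : Int) (out : Int) : Prop := out = not_good_math_alt n k
instance (n : Int) (k : Int) (out : Int) : Decidable (Spec_not_good_math n k out) := by unfold Spec_not_good_math; infer_instance

-- ===== CLAIM (what is proved, stated in full; the proofs are below) =====
def Claim_equal_not_good_math : Prop := ∀ (n : Int) (k : Int), Dom_not_good_math n k → Spec_not_good_math n k (not_good_math n k)

-- ===== LEMMAS AND PROOFS =====

-- once n is 0, A keeps dividing 0 by 10 and returns 0
theorem A_zero (m : Nat) : ∀ (k : Int), k.toNat = m → not_good_math 0 k = 0 := by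
  induction m with
  | zero =>
      intro k hk
      rw [not_good_math]
      simp [show ¬ (k > 0) by omega]
  | succ m ih =>
      intro k hk
      rw [not_good_math]
      have hm : PySem.Int.mod (0 : Int) 10 = 0 := PySem.Int.mod_eq_emod_of_pos (by norm_num)
      have hf : PySem.Int.floordiv (0 : Int) 10 = 0 := by
        rw [PySem.Int.floordiv_eq_ediv_of_pos (by norm_num)]; norm_num
      simp [show (0:Int) < k by omega, ih (k - 1) (by omega)]

-- t consecutive subtract-1 steps of A (1 ≤ t ≤ n % 10, t ≤ k) collapse to one jump
theorem A_batch (m : Nat) : ∀ (n k t : Int), t.toNat = m → 1 ≤ t → t ≤ n % 10 → t ≤ k →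
    not_good_math n k = not_good_math (n - t) (k - t) := by
  induction m with
  | zero => intro n k t ht h1 _ _; omega
  | succ m ih =>
      intro n k t ht h1 h2 h3
      have hr : 1 ≤ n % 10 := by omega
      have hm : PySem.Int.mod n 10 = n % 10 := PySem.Int.mod_eq_emod_of_pos (by norm_num)
      rw [not_good_math]
      simp only [hm, show (0:Int) < k by omega, dite_true, beq_iff_eq,
        show n % 10 ≠ 0 by omega, ite_false]
      rcases eq_or_lt_of_le h1 with h | h
      · simp [← h]
      · have hstep : (n - 1) % 10 = n % 10 - 1 := by omega
        rw [ih (n - 1) (k - 1) (t - 1) (by omega) (by omega) (by omega) (by omega)]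
        have e1 : n - 1 - (t - 1) = n - t := by ring
        have e2 : k - 1 - (t - 1) = k - t := by ring
        rw [e1, e2]

theorem AB_eq (m : Nat) : ∀ (n k : Int), k.toNat = m → not_good_math n k = not_good_math_alt n k := by
  induction m using Nat.strong_induction_on with
  | _ m ih =>
      intro n k hk
      by_cases hkpos : k > 0
      · have hm : PySem.Int.mod n 10 = n % 10 := PySem.Int.mod_eq_emod_of_pos (by norm_num)
        by_cases hn : n = 0
        · subst hn
          rw [not_good_math_alt]
          simp only [hkpos, ne_eq, not_true_eq_false, and_false, dite_false]
          exact A_zero k.toNat k rfl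
        · by_cases hr : n % 10 = 0
          · rw [not_good_math, not_good_math_alt]
            simp only [hm, hr, hkpos, hn, ne_eq, not_false_eq_true, and_true, dite_true,
              beq_self_eq_true, if_true]
            exact ih (k - 1).toNat (by omega) _ (k - 1) rfl
          · rw [not_good_math_alt]
            simp only [hm, hkpos, hn, ne_eq, not_false_eq_true, and_true, dite_true,
              beq_iff_eq, hr, if_neg]
            set t : Int := if n % 10 < k then n % 10 else k with htdef
            have ht1 : 1 ≤ t := by rw [htdef]; split <;> omega
            have ht2 : t ≤ n % 10 := by rw [htdef]; split <;> omega
            have ht3 : t ≤ k := by rw [htdef]; split <;> omega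
            rw [A_batch t.toNat n k t rfl ht1 ht2 ht3]
            exact ih (k - t).toNat (by omega) _ (k - t) rfl
      · rw [not_good_math, not_good_math_alt]
        simp [hkpos]

-- ===== VERDICT (by name: the statement is the Claim_ definition above) =====
theorem not_good_math_spec : Claim_equal_not_good_math := by
  intro n k _
  exact AB_eq k.toNat n k rfl
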